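-- pv_equiv track=rewrite | github.com/DigBickMill/Image-Organiser | image_organiser.py | createDIRArr
-- ===== SOURCE A (Python) =====
-- def createDIRArr(dirArr):
--     extensions = [".jpeg", ".png",".jpg",".gif"] #NEEDS IMPROVEMENT (better way to do this)
--     #bad practice to have hardcoded file extensions
--     jpgArr =[]
--     pngArr=[]
--     gifArr=[]
--     #sorts images into arrays of their given extenstion
--     for ext in extensions:
--         for file in dirArr:
--             if ext in file.lower():
--                 if ext == ".jpeg" or ext == ".jpg":
--                     jpgArr.append(file)
--                 elif ext == ".png":
--                     pngArr.append(file)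
--                 elif ext == ".gif":
--                     gifArr.append(file)
--     return jpgArr, pngArr, gifArr
-- ===== SOURCE B (Python) =====
-- def createDIRArr(dirArr):
--     # single pass: four buckets, jpeg kept before jpg to preserve A's grouping
--     jpegArr = []
--     jpgArr = []
--     pngArr = []
--     gifArr = []
--     for file in dirArr:
--         low = file.lower()
--         if ".jpeg" in low:
--             jpegArr.append(file)
--         if ".jpg" in low:
--             jpgArr.append(file)
--         if ".png" in low:
--             pngArr.append(file)
--         if ".gif" in low:
--             gifArr.append(file)
--     return jpegArr + jpgArr, pngArr, gifArr
-- ===== Notes on version B (the rewrite author's own statement) =====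
-- stated objective: faster
-- what changed: Replaced the nested loop over extensions x files (computing file.lower() four times per file) with a single pass over dirArr that lowercases each name once and appends to four independent buckets, concatenating jpeg+jpg at the end to preserve A's ordering.
import Mathlib
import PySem

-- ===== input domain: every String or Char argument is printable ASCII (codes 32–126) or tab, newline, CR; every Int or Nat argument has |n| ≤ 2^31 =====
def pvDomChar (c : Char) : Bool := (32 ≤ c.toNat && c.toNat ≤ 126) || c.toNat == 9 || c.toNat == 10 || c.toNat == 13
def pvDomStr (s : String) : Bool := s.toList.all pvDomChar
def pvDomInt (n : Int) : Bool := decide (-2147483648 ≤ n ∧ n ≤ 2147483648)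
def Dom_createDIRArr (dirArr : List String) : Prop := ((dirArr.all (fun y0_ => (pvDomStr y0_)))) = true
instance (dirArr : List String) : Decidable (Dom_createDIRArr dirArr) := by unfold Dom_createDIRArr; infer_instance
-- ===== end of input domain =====

-- B is one pass over dirArr (lower() once per file) instead of A's four passes; same return value.

-- ===== PORT A =====
-- literal transliteration: outer loop over the hardcoded extension list, inner loop over dirArr
def createDIRArr (dirArr : List String) : List String × List String × List String :=
  let extensions := [".jpeg", ".png", ".jpg", ".gif"]
  extensions.foldl
    (fun acc ext =>
      dirArr.foldl
        (fun acc file =>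
          if PySem.Str.isIn ext (PySem.Str.lower file) then
            if ext == ".jpeg" || ext == ".jpg" then (acc.1 ++ [file], acc.2.1, acc.2.2)
            else if ext == ".png" then (acc.1, acc.2.1 ++ [file], acc.2.2)
            else if ext == ".gif" then (acc.1, acc.2.1, acc.2.2 ++ [file])
            else acc
          else acc)
        acc)
    ([], [], [])

-- ===== PORT B =====
-- single pass, four buckets, jpeg ++ jpg at the end
def createDIRArr_alt (dirArr : List String) : List String × List String × List String :=
  let r := dirArr.foldl
    (fun (acc : List String × List String × List String × List String) file =>
      let low := PySem.Str.lower file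
      let acc := if PySem.Str.isIn ".jpeg" low then (acc.1 ++ [file], acc.2) else acc
      let acc := if PySem.Str.isIn ".jpg" low then (acc.1, acc.2.1 ++ [file], acc.2.2) else acc
      let acc := if PySem.Str.isIn ".png" low then (acc.1, acc.2.1, acc.2.2.1 ++ [file], acc.2.2.2) else acc
      let acc := if PySem.Str.isIn ".gif" low then (acc.1, acc.2.1, acc.2.2.1, acc.2.2.2 ++ [file]) else acc
      acc)
    ([], [], [], [])
  (r.1 ++ r.2.1, r.2.2.1, r.2.2.2)

-- ===== PRECONDITION & SPEC =====
def Spec_createDIRArr (dirArr : List String) (out : List String × List String × List String) : Prop := out = createDIRArr_alt dirArr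
instance (dirArr : List String) (out : List String × List String × List String) : Decidable (Spec_createDIRArr dirArr out) := by unfold Spec_createDIRArr; infer_instance

-- ===== CLAIM (what is proved, stated in full; the proofs are below) =====
def Claim_equal_createDIRArr : Prop := ∀ (dirArr : List String), Dom_createDIRArr dirArr → Spec_createDIRArr dirArr (createDIRArr dirArr)

-- ===== LEMMAS AND PROOFS =====

-- A's inner loop for a first-component extension appends the matching files to the first bucket
theorem pvFoldFst (p : String → Bool) (xs : List String) :
    ∀ (j pn g : List String),
      xs.foldl (fun (acc : List String × List String × List String) f =>
        if p f then (acc.1 ++ [f], acc.2.1, acc.2.2) else acc) (j, pn, g)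
      = (j ++ xs.filter p, pn, g) := by
  induction xs with
  | nil => simp
  | cons x xs ih =>
    intro j pn g
    by_cases h : p x <;> simp [List.foldl_cons, h, ih]

theorem pvFoldSnd (p : String → Bool) (xs : List String) :
    ∀ (j pn g : List String),
      xs.foldl (fun (acc : List String × List String × List String) f =>
        if p f then (acc.1, acc.2.1 ++ [f], acc.2.2) else acc) (j, pn, g)
      = (j, pn ++ xs.filter p, g) := by
  induction xs with
  | nil => simp
  | cons x xs ih =>
    intro j pn g
    by_cases h : p x <;> simp [List.foldl_cons, h, ih]

theorem pvFoldThd (p : String → Bool) (xs : List String) :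
    ∀ (j pn g : List String),
      xs.foldl (fun (acc : List String × List String × List String) f =>
        if p f then (acc.1, acc.2.1, acc.2.2 ++ [f]) else acc) (j, pn, g)
      = (j, pn, g ++ xs.filter p) := by
  induction xs with
  | nil => simp
  | cons x xs ih =>
    intro j pn g
    by_cases h : p x <;> simp [List.foldl_cons, h, ih]

-- B's single pass appends each file to every bucket whose predicate holds
theorem pvFoldQuad (p1 p2 p3 p4 : String → Bool) (xs : List String) :
    ∀ (a b c d : List String),
      xs.foldl (fun (acc : List String × List String × List String × List String) file =>
        let acc := if p1 file then (acc.1 ++ [file], acc.2) else acc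
        let acc := if p2 file then (acc.1, acc.2.1 ++ [file], acc.2.2) else acc
        let acc := if p3 file then (acc.1, acc.2.1, acc.2.2.1 ++ [file], acc.2.2.2) else acc
        let acc := if p4 file then (acc.1, acc.2.1, acc.2.2.1, acc.2.2.2 ++ [file]) else acc
        acc) (a, b, c, d)
      = (a ++ xs.filter p1, b ++ xs.filter p2, c ++ xs.filter p3, d ++ xs.filter p4) := by
  induction xs with
  | nil => simp
  | cons x xs ih =>
    intro a b c d
    by_cases h1 : p1 x <;> by_cases h2 : p2 x <;> by_cases h3 : p3 x <;> by_cases h4 : p4 x <;>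
      simp [List.foldl_cons, h1, h2, h3, h4, ih]

-- ===== VERDICT (by name: the statement is the Claim_ definition above) =====
theorem createDIRArr_spec : Claim_equal_createDIRArr := by
  intro dirArr _
  show createDIRArr dirArr = createDIRArr_alt dirArr
  unfold createDIRArr createDIRArr_alt
  simp only [List.foldl_cons, List.foldl_nil, String.reduceBEq, Bool.or_false,
    Bool.or_true, Bool.false_eq_true, if_false, if_true]
  rw [pvFoldFst (fun f => PySem.Str.isIn ".jpeg" (PySem.Str.lower f)) dirArr [] [] [],
      pvFoldSnd (fun f => PySem.Str.isIn ".png" (PySem.Str.lower f)) dirArr,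
      pvFoldFst (fun f => PySem.Str.isIn ".jpg" (PySem.Str.lower f)) dirArr,
      pvFoldThd (fun f => PySem.Str.isIn ".gif" (PySem.Str.lower f)) dirArr,
      pvFoldQuad (fun f => PySem.Str.isIn ".jpeg" (PySem.Str.lower f))
                 (fun f => PySem.Str.isIn ".jpg" (PySem.Str.lower f))
                 (fun f => PySem.Str.isIn ".png" (PySem.Str.lower f))
                 (fun f => PySem.Str.isIn ".gif" (PySem.Str.lower f)) dirArr [] [] [] []]
  simp
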